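-- pv_equiv track=rewrite | github.com/lycheecheeee/broker-report-analysis | backend.py | get_archived_records
-- ===== SOURCE A (Python) =====
-- def get_archived_records(all_results):
--     """從全部 record 中取所有非最新嘅 record（archived record）。
--
--     Args:
--         all_results: Supabase 返回嘅全部 record list
--     Returns:
--         list: 所有非最新嘅 record，按 created_at 降序排列
--     """
--     if not all_results:
--         return []
--
--     from collections import defaultdict
--     groups = defaultdict(list)
--     for r in all_results:
--         fname = r.get('pdf_filename', '')
--         groups[fname].append(r)
--
--     # 每個 group 取最新一條嘅 id
--     latest_ids = set()
--     for fname, records in groups.items():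
--         latest = max(records, key=lambda x: x.get('created_at', ''))
--         latest_ids.add(latest.get('id'))
--
--     # 所有唔係最新嘅 record
--     archived = [r for r in all_results if r.get('id') not in latest_ids]
--     archived.sort(key=lambda x: x.get('created_at', ''), reverse=True)
--
--     return archived
-- ===== SOURCE B (Python) =====
-- def get_archived_records(all_results):
--     """Sort once descending by created_at (stable), then one pass over the sorted
--     list: the first record seen per pdf_filename is the latest; filter its ids out."""
--     ordered = sorted(all_results, key=lambda x: x.get('created_at', ''), reverse=True)
--     seen_files = set()
--     latest_ids = set()
--     for r in ordered:
--         fname = r.get('pdf_filename', '')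
--         if fname not in seen_files:
--             seen_files.add(fname)
--             latest_ids.add(r.get('id'))
--     return [r for r in ordered if r.get('id') not in latest_ids]
-- ===== Notes on version B (the rewrite author's own statement) =====
-- stated objective: alternative
-- what changed: Instead of grouping records per filename into a dict, taking max() of each group and then sorting the survivors, B sorts the whole list descending once (stable) and makes a single pass over it with a seen-filenames set: the first occurrence of each pdf_filename is the latest record, and the already-sorted list filtered by those ids is the result, so grouping, max() and the second sort all disappear.
import Mathlib
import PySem

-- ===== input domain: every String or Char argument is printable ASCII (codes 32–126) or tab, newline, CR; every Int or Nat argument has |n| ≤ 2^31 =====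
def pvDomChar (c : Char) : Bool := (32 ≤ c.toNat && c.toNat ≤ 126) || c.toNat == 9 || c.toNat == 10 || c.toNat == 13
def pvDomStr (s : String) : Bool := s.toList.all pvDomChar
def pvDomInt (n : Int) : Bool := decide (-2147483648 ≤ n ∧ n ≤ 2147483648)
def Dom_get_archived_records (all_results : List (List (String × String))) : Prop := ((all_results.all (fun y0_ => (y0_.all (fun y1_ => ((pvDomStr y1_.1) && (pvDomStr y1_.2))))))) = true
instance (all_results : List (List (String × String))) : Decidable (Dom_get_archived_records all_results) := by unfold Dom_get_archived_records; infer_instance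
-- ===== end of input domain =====

-- B replaces A's group-dict + per-group max() + final sort with ONE stable descending
-- sort followed by a single seen-filenames pass (objective: alternative decomposition).

-- shared accessor: Python's r.get(k, d) / r.get(k) on a record viewed as a dict
def pvRGetD (r : List (String × String)) (k d : String) : String :=
  (PySem.Dict.mk r).getD k d

def pvRGet? (r : List (String × String)) (k : String) : Option String :=
  (PySem.Dict.mk r).get? k

-- ===== PORT A =====
def get_archived_records (all_results : List (List (String × String))) : List (List (String × String)) :=
  if all_results = [] then []
  else
    -- groups = defaultdict(list); for r: groups[r.get('pdf_filename','')].append(r)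
    let groups : PySem.Dict String (List (List (String × String))) :=
      all_results.foldl (fun d r => d.modify (pvRGetD r "pdf_filename" "") [] (· ++ [r])) PySem.Dict.empty
    -- for fname, records in groups.items(): latest_ids.add(max(records, key=...).get('id'))
    let latest_ids : PySem.Set (Option String) :=
      groups.items.foldl (fun s p =>
        match PySem.List.max? p.2 (fun x => pvRGetD x "created_at" "") with
        | some latest => PySem.Set.add s (pvRGet? latest "id")
        | none => s) PySem.Set.empty  -- none branch unreachable (groups' lists are non-empty); keeps the port total
    -- archived = [r for r in all_results if r.get('id') not in latest_ids]; archived.sort(key=..., reverse=True)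
    let archived := all_results.filter (fun r => !(PySem.Set.contains latest_ids (pvRGet? r "id")))
    PySem.List.sorted archived (fun x => pvRGetD x "created_at" "") true

-- ===== PORT B =====
def get_archived_records_alt (all_results : List (List (String × String))) : List (List (String × String)) :=
  -- ordered = sorted(all_results, key=lambda x: x.get('created_at',''), reverse=True)
  let ordered := PySem.List.sorted all_results (fun x => pvRGetD x "created_at" "") true
  -- seen_files = set(); latest_ids = set(); one pass: first occurrence per filename is the latest
  let st : PySem.Set String × PySem.Set (Option String) :=
    ordered.foldl (fun st r =>
      let fname := pvRGetD r "pdf_filename" ""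
      if PySem.Set.contains st.1 fname then st
      else (PySem.Set.add st.1 fname, PySem.Set.add st.2 (pvRGet? r "id")))
      (PySem.Set.empty, PySem.Set.empty)
  -- [r for r in ordered if r.get('id') not in latest_ids]
  ordered.filter (fun r => !(PySem.Set.contains st.2 (pvRGet? r "id")))

-- ===== PRECONDITION & SPEC =====
def Spec_get_archived_records (all_results : List (List (String × String))) (out : List (List (String × String))) : Prop := out = get_archived_records_alt all_results
instance (all_results : List (List (String × String))) (out : List (List (String × String))) : Decidable (Spec_get_archived_records all_results out) := by unfold Spec_get_archived_records; infer_instance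

-- ===== CLAIM (what is proved, stated in full; the proofs are below) =====
def Claim_equal_get_archived_records : Prop := ∀ (all_results : List (List (String × String))), Dom_get_archived_records all_results → Spec_get_archived_records all_results (get_archived_records all_results)

-- ===== LEMMAS AND PROOFS =====

-- abbreviations used only by the proofs
def pvK (r : List (String × String)) : String := pvRGetD r "created_at" ""
def pvF (r : List (String × String)) : String := pvRGetD r "pdf_filename" ""
def pvI (r : List (String × String)) : Option String := pvRGet? r "id"
-- the descending comparator PySem.List.sorted _ pvK true inserts with
def pvBf (a b : List (String × String)) : Bool := decide (pvK b < pvK a)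

-- max? over a list extended on the right is one step of the running-max loop
lemma pvMax?_append_singleton (xs : List (List (String × String))) (r : List (String × String)) :
    PySem.List.max? (xs ++ [r]) pvK =
      match PySem.List.max? xs pvK with
      | none => some r
      | some m => if pvK m < pvK r then some r else some m := by
  simp only [PySem.List.max?, List.foldl_append, List.foldl_cons, List.foldl_nil]
  split <;> rename_i heq <;> rw [heq]

-- the head of the stable descending sort is Python's max(..., key=...): the FIRST maximal element
lemma pvHead?_sorted_rev (l : List (List (String × String))) :
    (PySem.List.sorted l pvK true).head? = PySem.List.max? l pvK := by
  induction l using List.reverseRecOn with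
  | nil => rfl
  | append_singleton l x ih =>
      rw [PySem.List.sorted_rev_eq_foldl_insertBy, List.foldl_append, List.foldl_cons, List.foldl_nil,
        ← PySem.List.sorted_rev_eq_foldl_insertBy, pvMax?_append_singleton]
      cases h : PySem.List.sorted l pvK true with
      | nil =>
          have : l = [] := (PySem.List.sorted_eq_nil_iff _ _ _).mp h
          subst this
          simp [PySem.List.insertBy, PySem.List.max?]
      | cons y ys =>
          rw [h] at ih
          rw [← ih]
          simp only [PySem.List.insertBy, List.head?]
          by_cases hlt : pvK y < pvK x <;> simp [hlt]

-- insertBy with the descending comparator preserves descending pairwise order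
lemma pvPairwise_insertBy (x : List (String × String)) (acc : List (List (String × String)))
    (h : acc.Pairwise (fun a b => pvK b ≤ pvK a)) :
    (PySem.List.insertBy pvBf x acc).Pairwise (fun a b => pvK b ≤ pvK a) := by
  induction acc with
  | nil => simp [PySem.List.insertBy]
  | cons y ys ih =>
      rw [List.pairwise_cons] at h
      by_cases hlt : pvK y < pvK x
      · simp only [PySem.List.insertBy, pvBf, hlt, decide_true, if_true]
        refine List.pairwise_cons.mpr ⟨?_, List.pairwise_cons.mpr h⟩
        intro b hb
        rcases List.mem_cons.mp hb with rfl | hb'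
        · exact le_of_lt hlt
        · exact le_trans (h.1 b hb') (le_of_lt hlt)
      · simp only [PySem.List.insertBy, pvBf, hlt, decide_false, Bool.false_eq_true, if_false]
        refine List.pairwise_cons.mpr ⟨?_, ih h.2⟩
        intro b hb
        rcases (PySem.List.mem_insertBy _ _ _ _).mp hb with rfl | hb'
        · exact not_lt.mp hlt
        · exact h.1 b hb'

-- filtering commutes with a single descending insertion (into a descending-sorted list)
lemma pvFilter_insertBy (p : List (String × String) → Bool) (x : List (String × String))
    (acc : List (List (String × String))) (h : acc.Pairwise (fun a b => pvK b ≤ pvK a)) :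
    (PySem.List.insertBy pvBf x acc).filter p =
      if p x then PySem.List.insertBy pvBf x (acc.filter p) else acc.filter p := by
  induction acc with
  | nil => by_cases hx : p x <;> simp [PySem.List.insertBy, List.filter, hx]
  | cons y ys ih =>
      rw [List.pairwise_cons] at h
      by_cases hlt : pvK y < pvK x
      · simp only [PySem.List.insertBy, pvBf, hlt, decide_true, if_true]
        by_cases hy : p y
        · by_cases hx : p x <;>
            simp [List.filter, hx, hy, PySem.List.insertBy, pvBf, hlt]
        · by_cases hx : p x <;> simp only [List.filter, hx, hy, if_true] <;>
            [skip; rfl]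
          -- p x true, p y false: insertBy x (ys.filter p) must put x at the head
          cases hf : ys.filter p with
          | nil => simp [PySem.List.insertBy]
          | cons z zs =>
              have hz : z ∈ ys := List.mem_of_mem_filter (hf ▸ List.mem_cons_self)
              have : pvK z < pvK x := lt_of_le_of_lt (h.1 z hz) hlt
              simp [PySem.List.insertBy, pvBf, this]
      · simp only [PySem.List.insertBy, pvBf, hlt, decide_false, Bool.false_eq_true, if_false]
        by_cases hy : p y
        · by_cases hx : p x <;>
            simp [List.filter, hx, hy, PySem.List.insertBy, pvBf, hlt, ih h.2]
        · by_cases hx : p x <;> simp [List.filter, hx, hy, ih h.2]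

-- filtering commutes with the whole stable descending sort
lemma pvFilter_foldl_insertBy (p : List (String × String) → Bool)
    (l acc : List (List (String × String))) (h : acc.Pairwise (fun a b => pvK b ≤ pvK a)) :
    (l.foldl (fun acc x => PySem.List.insertBy pvBf x acc) acc).filter p =
      (l.filter p).foldl (fun acc x => PySem.List.insertBy pvBf x acc) (acc.filter p) := by
  induction l generalizing acc with
  | nil => rfl
  | cons x t ih =>
      simp only [List.foldl_cons]
      rw [ih _ (pvPairwise_insertBy x acc h), pvFilter_insertBy p x acc h]
      by_cases hx : p x <;> simp [List.filter, hx]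

lemma pvFilter_sorted_rev (p : List (String × String) → Bool) (l : List (List (String × String))) :
    (PySem.List.sorted l pvK true).filter p = PySem.List.sorted (l.filter p) pvK true := by
  rw [PySem.List.sorted_rev_eq_foldl_insertBy, PySem.List.sorted_rev_eq_foldl_insertBy]
  exact pvFilter_foldl_insertBy p l [] List.Pairwise.nil

-- the records of l whose filename has not been seen before (B's single pass selects these)
def pvFirsts : List (List (String × String)) → List String → List (List (String × String))
  | [], _ => []
  | r :: t, seen => if pvF r ∈ seen then pvFirsts t seen else r :: pvFirsts t (pvF r :: seen)

lemma pvFirsts_congr (l : List (List (String × String))) (s1 s2 : List String)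
    (h : ∀ x, x ∈ s1 ↔ x ∈ s2) : pvFirsts l s1 = pvFirsts l s2 := by
  induction l generalizing s1 s2 with
  | nil => rfl
  | cons r t ih =>
      simp only [pvFirsts]
      by_cases hm : pvF r ∈ s1
      · rw [if_pos hm, if_pos ((h _).mp hm)]; exact ih s1 s2 h
      · rw [if_neg hm, if_neg (fun hc => hm ((h _).mpr hc))]
        exact congrArg _ (ih _ _ (by intro x; simp only [List.mem_cons]; rw [h x]))

-- membership in pvFirsts = "first record of l carrying its filename, filename unseen"
lemma pvFirsts_mem (l : List (List (String × String))) (seen : List String)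
    (m : List (String × String)) :
    m ∈ pvFirsts l seen ↔
      pvF m ∉ seen ∧ (l.filter (fun r => pvF r == pvF m)).head? = some m := by
  induction l generalizing seen with
  | nil => simp [pvFirsts]
  | cons r t ih =>
      simp only [pvFirsts]
      by_cases hm : pvF r ∈ seen
      · rw [if_pos hm, ih]
        by_cases hms : pvF m ∈ seen
        · simp [hms]
        · have hne : (pvF r == pvF m) = false := by
            simp only [beq_eq_false_iff_ne]
            intro h; exact hms (h ▸ hm)
          simp [List.filter, hne, hms]
      · rw [if_neg hm]
        simp only [List.mem_cons, ih]
        by_cases heq : pvF m = pvF r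
        · have hbe : (pvF r == pvF m) = true := by simp [heq]
          constructor
          · rintro (rfl | ⟨hns, -⟩)
            · exact ⟨heq ▸ hm, by simp [List.filter]⟩
            · exact absurd (Or.inl heq) hns
          · rintro ⟨hns, hh⟩
            left
            simp only [List.filter, hbe, List.head?] at hh
            exact (Option.some.inj hh).symm
        · have hne : (pvF r == pvF m) = false := by
            simp only [beq_eq_false_iff_ne]
            exact fun h => heq h.symm
          constructor
          · rintro (rfl | ⟨hns, hh⟩)
            · exact absurd rfl heq
            · refine ⟨fun hc => hns (Or.inr hc), ?_⟩
              simpa [List.filter, hne] using hh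
          · rintro ⟨hns, hh⟩
            right
            exact ⟨fun h => h.elim heq hns, by simpa [List.filter, hne] using hh⟩

-- B's fold over (seen, ids): what ends up in ids
lemma pvBFold_mem (l : List (List (String × String))) (seen : PySem.Set String)
    (ids : PySem.Set (Option String)) (y : Option String) :
    y ∈ (l.foldl (fun st r =>
          let fname := pvRGetD r "pdf_filename" ""
          if PySem.Set.contains st.1 fname then st
          else (PySem.Set.add st.1 fname, PySem.Set.add st.2 (pvRGet? r "id")))
        (seen, ids)).2 ↔
      y ∈ ids ∨ ∃ m ∈ pvFirsts l seen, y = pvI m := by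
  induction l generalizing seen ids with
  | nil => simp [pvFirsts]
  | cons r t ih =>
      simp only [List.foldl_cons]
      by_cases hm : pvF r ∈ seen
      · have hc : PySem.Set.contains seen (pvRGetD r "pdf_filename" "") = true :=
          (PySem.Set.contains_iff _ _).mpr hm
        simp only [hc, if_true, ih, pvFirsts, hm]
      · have hc : PySem.Set.contains seen (pvRGetD r "pdf_filename" "") = false := by
          rcases hh : PySem.Set.contains seen (pvRGetD r "pdf_filename" "") with _ | _
          · rfl
          · exact absurd ((PySem.Set.contains_iff _ _).mp hh) hm
        simp only [hc, Bool.false_eq_true, if_false, ih, pvFirsts, hm]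
        rw [pvFirsts_congr t (PySem.Set.add seen (pvRGetD r "pdf_filename" "")) (pvF r :: seen)
          (by intro x; rw [PySem.Set.mem_add]; simp only [List.mem_cons, pvF]; tauto)]
        simp only [PySem.Set.mem_add, List.mem_cons]
        constructor
        · rintro ((h | rfl) | ⟨m, hmf, rfl⟩)
          · exact Or.inl h
          · exact Or.inr ⟨r, Or.inl rfl, rfl⟩
          · exact Or.inr ⟨m, Or.inr hmf, rfl⟩
        · rintro (h | ⟨m, (rfl | hmf), rfl⟩)
          · exact Or.inl (Or.inl h)
          · exact Or.inl (Or.inr rfl)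
          · exact Or.inr ⟨m, hmf, rfl⟩

-- A's latest_ids fold, membership description
lemma pvMemAFold (items : List (String × List (List (String × String))))
    (s0 : PySem.Set (Option String)) (y : Option String) :
    (y ∈ items.foldl (fun s p =>
        match PySem.List.max? p.2 pvK with
        | some latest => PySem.Set.add s (pvRGet? latest "id")
        | none => s) s0) ↔
      (y ∈ s0 ∨ ∃ p ∈ items, ∃ m, PySem.List.max? p.2 pvK = some m ∧ y = pvRGet? m "id") := by
  induction items generalizing s0 with
  | nil => simp
  | cons p t ih =>
      simp only [List.foldl_cons]
      cases hm : PySem.List.max? p.2 pvK with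
      | none =>
          rw [ih]
          constructor
          · rintro (h | h)
            · exact Or.inl h
            · exact Or.inr (by obtain ⟨q, hq, m, hqm, hy⟩ := h; exact ⟨q, List.mem_cons_of_mem _ hq, m, hqm, hy⟩)
          · rintro (h | ⟨q, hq, m, hqm, hy⟩)
            · exact Or.inl h
            · rcases List.mem_cons.mp hq with rfl | hq'
              · exact absurd hqm (by rw [show PySem.List.max? q.2 pvK = none from hm]; simp)
              · exact Or.inr ⟨q, hq', m, hqm, hy⟩
      | some latest =>
          rw [ih]
          simp only [PySem.Set.mem_add]
          constructor
          · rintro ((h | rfl) | h)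
            · exact Or.inl h
            · exact Or.inr ⟨p, List.mem_cons_self, latest, hm, rfl⟩
            · obtain ⟨q, hq, m, hqm, hy⟩ := h
              exact Or.inr ⟨q, List.mem_cons_of_mem _ hq, m, hqm, hy⟩
          · rintro (h | ⟨q, hq, m, hqm, hy⟩)
            · exact Or.inl (Or.inl h)
            · rcases List.mem_cons.mp hq with rfl | hq'
              · rw [show PySem.List.max? q.2 pvK = some latest from hm] at hqm
                exact Or.inl (Or.inr (by cases hqm; exact hy))
              · exact Or.inr ⟨q, hq', m, hqm, hy⟩

-- the groups dict maps each filename to the original-order sublist carrying it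
lemma pvGroupsGetD (all : List (List (String × String))) (f : String) :
    (all.foldl (fun d r => d.modify (pvRGetD r "pdf_filename" "") [] (· ++ [r])) PySem.Dict.empty).getD f []
      = all.filter (fun r => pvF r == f) := by
  have h : all.foldl (fun d r => d.modify (pvRGetD r "pdf_filename" "") [] (· ++ [r])) PySem.Dict.empty
      = (all.map (fun r => (pvF r, r))).foldl (fun d p => d.modify p.1 [] (· ++ [p.2])) PySem.Dict.empty := by
    rw [List.foldl_map]; rfl
  rw [h, PySem.Dict.getD_foldl_modify_append, PySem.Dict.getD_empty]
  simp [List.filter_map, Function.comp_def]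

theorem get_archived_records_spec : Claim_equal_get_archived_records := by
  intro all _
  show get_archived_records all = get_archived_records_alt all
  by_cases hnil : all = []
  · subst hnil; rfl
  · unfold get_archived_records get_archived_records_alt
    rw [if_neg hnil]
    rw [show (fun x => pvRGetD x "created_at" "") = pvK from rfl]
    set s := PySem.List.sorted all pvK true with hs
    set groups := all.foldl (fun d r => d.modify (pvRGetD r "pdf_filename" "") [] (· ++ [r])) PySem.Dict.empty with hgroups
    set SA := groups.items.foldl (fun s p =>
        match PySem.List.max? p.2 pvK with
        | some latest => PySem.Set.add s (pvRGet? latest "id")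
        | none => s) PySem.Set.empty with hSA
    set SB := (s.foldl (fun st r =>
        let fname := pvRGetD r "pdf_filename" ""
        if PySem.Set.contains st.1 fname then st
        else (PySem.Set.add st.1 fname, PySem.Set.add st.2 (pvRGet? r "id")))
        (PySem.Set.empty, PySem.Set.empty)).2 with hSB
    have hnodup : groups.keys.Nodup := by
      rw [hgroups]
      exact PySem.Dict.nodup_keys_foldl_modify_key all pvF [] (fun _ r v => v ++ [r]) PySem.Dict.empty (by simp [PySem.Dict.keys_empty])
    -- characterise membership in SA
    have hSAmem : ∀ y, y ∈ SA ↔ ∃ m, (s.filter (fun r => pvF r == pvF m)).head? = some m ∧ y = pvI m := by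
      intro y
      rw [hSA, pvMemAFold]
      simp only [PySem.Set.empty, List.not_mem_nil, false_or]
      constructor
      · rintro ⟨p, hp, m, hmax, rfl⟩
        have hget : groups.getD p.1 [] = p.2 := PySem.Dict.getD_of_mem_items groups hp hnodup []
        rw [pvGroupsGetD] at hget
        rw [← hget, ← pvHead?_sorted_rev, ← pvFilter_sorted_rev, ← hs] at hmax
        have hm' : m ∈ s.filter (fun r => pvF r == p.1) := List.mem_of_mem_head? hmax
        have hfe : pvF m = p.1 := by simpa using (List.mem_filter.mp hm').2
        exact ⟨m, by rw [hfe]; exact hmax, rfl⟩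
      · rintro ⟨m, hh, rfl⟩
        have hm : m ∈ s := List.mem_of_mem_filter (List.mem_of_mem_head? hh)
        have hm' : m ∈ all := (PySem.List.mem_sorted _ _ _ _).mp hm
        refine ⟨(pvF m, groups.getD (pvF m) []), ?_, m, ?_, rfl⟩
        · have hk : pvF m ∈ groups.keys := by
            have hkeys : groups.keys = PySem.Set.update PySem.Dict.empty.keys (all.map pvF) :=
              PySem.Dict.keys_foldl_modify_key all pvF [] (fun _ r v => v ++ [r]) PySem.Dict.empty
            rw [hkeys]
            simp only [PySem.Dict.keys_empty]
            have : pvF m ∈ all.map pvF := List.mem_map_of_mem hm'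
            simpa [PySem.Set.update, ← PySem.Set.ofList_eq_foldl, PySem.Set.mem_ofList] using this
          have := PySem.Dict.items_eq_map_keys groups hnodup []
          rw [this]
          exact List.mem_map_of_mem hk
        · rw [pvGroupsGetD, ← pvHead?_sorted_rev, ← pvFilter_sorted_rev, ← hs]
          exact hh
    -- characterise membership in SB
    have hSBmem : ∀ y, y ∈ SB ↔ ∃ m, (s.filter (fun r => pvF r == pvF m)).head? = some m ∧ y = pvI m := by
      intro y
      rw [hSB, pvBFold_mem]
      simp only [PySem.Set.empty, List.not_mem_nil, false_or]
      constructor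
      · rintro ⟨m, hmf, rfl⟩
        obtain ⟨-, hh⟩ := (pvFirsts_mem s [] m).mp hmf
        exact ⟨m, hh, rfl⟩
      · rintro ⟨m, hh, rfl⟩
        exact ⟨m, (pvFirsts_mem s [] m).mpr ⟨List.not_mem_nil, hh⟩, rfl⟩
    have hcont : ∀ z, PySem.Set.contains SA z = PySem.Set.contains SB z := by
      intro z
      rcases h1 : PySem.Set.contains SA z with _ | _ <;> rcases h2 : PySem.Set.contains SB z with _ | _
      · rfl
      · have hc := (PySem.Set.contains_iff _ _).mpr ((hSAmem z).mpr ((hSBmem z).mp ((PySem.Set.contains_iff _ _).mp h2)))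
        rw [h1] at hc; exact absurd hc (by simp)
      · have hc := (PySem.Set.contains_iff _ _).mpr ((hSBmem z).mpr ((hSAmem z).mp ((PySem.Set.contains_iff _ _).mp h1)))
        rw [h2] at hc; exact absurd hc (by simp)
      · rfl
    calc PySem.List.sorted (all.filter (fun r => !(PySem.Set.contains SA (pvRGet? r "id")))) pvK true
        = s.filter (fun r => !(PySem.Set.contains SA (pvRGet? r "id"))) := by
          rw [hs]
          exact (pvFilter_sorted_rev _ all).symm
      _ = s.filter (fun r => !(PySem.Set.contains SB (pvRGet? r "id"))) := by
          apply List.filter_congr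
          intro r _
          rw [hcont]
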